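-- pv_equiv track=rewrite | github.com/sfeeney/nsbh | sim_nsbh_analysis.py | allocate_all_jobs
-- ===== SOURCE A (Python) =====
-- def allocate_all_jobs(n_jobs, n_procs=1):
--     allocation = []
--     n_j_allocated = 0
--     for i in range(n_procs):
--         n_j_remain = n_jobs - n_j_allocated
--         n_p_remain = n_procs - i
--         n_j_to_allocate = n_j_remain // n_p_remain
--         allocation.append(range(n_j_allocated, \
--                                 n_j_allocated + n_j_to_allocate))
--         n_j_allocated += n_j_to_allocate
--     return allocation
-- ===== SOURCE B (Python) =====
-- def allocate_all_jobs(n_jobs, n_procs=1):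
--     # Closed form: no running total. The first k = n_procs - (n_jobs % n_procs)
--     # chunks get q = n_jobs // n_procs jobs, the remaining ones q + 1; the i-th
--     # boundary is therefore i*q + max(0, i - k).
--     if n_procs <= 0:
--         return []
--     q, r = divmod(n_jobs, n_procs)
--     k = n_procs - r
--     return [range(i * q + max(0, i - k), (i + 1) * q + max(0, i + 1 - k))
--             for i in range(n_procs)]
-- ===== Notes on version B (the rewrite author's own statement) =====
-- stated objective: simpler
-- what changed: Replaced the accumulator-threaded loop (running total of allocated jobs, per-step floor division of the remainder) by one divmod and a closed-form boundary formula i*q + max(0, i-k) per chunk.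
import Mathlib
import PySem

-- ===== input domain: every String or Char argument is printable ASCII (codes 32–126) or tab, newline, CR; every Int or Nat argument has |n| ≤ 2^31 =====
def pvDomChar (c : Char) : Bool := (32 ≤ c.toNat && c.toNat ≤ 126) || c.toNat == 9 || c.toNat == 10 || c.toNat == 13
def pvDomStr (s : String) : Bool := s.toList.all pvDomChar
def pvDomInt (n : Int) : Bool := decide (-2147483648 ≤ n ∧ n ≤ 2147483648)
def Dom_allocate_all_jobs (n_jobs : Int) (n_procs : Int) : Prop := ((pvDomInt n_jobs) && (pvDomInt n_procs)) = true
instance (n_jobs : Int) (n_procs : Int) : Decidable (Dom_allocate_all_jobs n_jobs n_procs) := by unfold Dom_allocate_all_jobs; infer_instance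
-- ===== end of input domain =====

-- B replaces A's accumulator-threaded loop by one divmod and a closed-form boundary
-- formula per chunk (objective: simpler).

-- ===== PORT A =====
-- loop body of A: state = (allocation, n_j_allocated)
def pvAStep (n_jobs n_procs : Int) (st : List (List Int) × Int) (i : Int) :
    List (List Int) × Int :=
  let n_j_remain := n_jobs - st.2
  let n_p_remain := n_procs - i
  let n_j_to_allocate := PySem.Int.floordiv n_j_remain n_p_remain
  (st.1 ++ [PySem.List.pyRange st.2 (st.2 + n_j_to_allocate) 1], st.2 + n_j_to_allocate)

def allocate_all_jobs (n_jobs : Int) (n_procs : Int) : List (List Int) :=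
  ((PySem.List.pyRange 0 n_procs 1).foldl (pvAStep n_jobs n_procs) ([], 0)).1

-- ===== PORT B =====
-- the i-th chunk of B: range(i*q + max(0, i-k), (i+1)*q + max(0, i+1-k))
def pvBChunk (q k : Int) (i : Int) : List Int :=
  PySem.List.pyRange (i * q + max 0 (i - k)) ((i + 1) * q + max 0 (i + 1 - k)) 1

def allocate_all_jobs_alt (n_jobs : Int) (n_procs : Int) : List (List Int) :=
  if n_procs ≤ 0 then []
  else
    let q := PySem.Int.floordiv n_jobs n_procs
    let r := PySem.Int.mod n_jobs n_procs
    let k := n_procs - r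
    (PySem.List.pyRange 0 n_procs 1).map (pvBChunk q k)

-- ===== PRECONDITION & SPEC =====
def Spec_allocate_all_jobs (n_jobs : Int) (n_procs : Int) (out : List (List Int)) : Prop := out = allocate_all_jobs_alt n_jobs n_procs
instance (n_jobs : Int) (n_procs : Int) (out : List (List Int)) : Decidable (Spec_allocate_all_jobs n_jobs n_procs out) := by unfold Spec_allocate_all_jobs; infer_instance

-- ===== CLAIM (what is proved, stated in full; the proofs are below) =====
def Claim_equal_allocate_all_jobs : Prop := ∀ (n_jobs : Int) (n_procs : Int), Dom_allocate_all_jobs n_jobs n_procs → Spec_allocate_all_jobs n_jobs n_procs (allocate_all_jobs n_jobs n_procs)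

-- ===== LEMMAS AND PROOFS =====

-- A's running total after j steps is j*q + max 0 (j-k); the step adds exactly q
-- (while j < k) or q+1 (once j ≥ k).
theorem pvStep_total (n p q r j : Int) (hq : n = q * p + r) (h0 : 0 ≤ r)
    (hjp : j < p) :
    j * q + max 0 (j - (p - r)) +
      PySem.Int.floordiv (n - (j * q + max 0 (j - (p - r)))) (p - j)
      = (j + 1) * q + max 0 (j + 1 - (p - r)) := by
  rcases lt_or_ge j (p - r) with hk | hk
  · have hm : max 0 (j - (p - r)) = 0 := by omega
    have hm' : max 0 (j + 1 - (p - r)) = 0 ∨ max 0 (j + 1 - (p - r)) = 0 := by omega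
    have hfd : PySem.Int.floordiv (n - (j * q + 0)) (p - j) = q := by
      rw [PySem.Int.floordiv_eq_iff_of_pos (by omega)]
      constructor
      · nlinarith
      · nlinarith
    have hmax1 : max 0 (j + 1 - (p - r)) = 0 := by omega
    rw [hm, hfd, hmax1]; ring
  · have hm : max 0 (j - (p - r)) = j - (p - r) := by omega
    have hfd : PySem.Int.floordiv (n - (j * q + (j - (p - r)))) (p - j) = q + 1 := by
      have hx : n - (j * q + (j - (p - r))) = (q + 1) * (p - j) := by
        rw [hq]; ring
      rw [hx]
      rw [PySem.Int.floordiv_eq_iff_of_pos (by omega)]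
      constructor
      · nlinarith
      · nlinarith
    have hm1 : max 0 (j + 1 - (p - r)) = j + 1 - (p - r) := by omega
    rw [hm, hfd, hm1]; ring

-- loop invariant: folding A's step from index j with total j*q + max 0 (j-k)
-- produces exactly B's chunks for indices j..p-1.
theorem pvLoop (n p q r : Int) (hq : n = q * p + r) (h0 : 0 ≤ r) :
    ∀ (m : Nat) (j : Int) (acc : List (List Int)), 0 ≤ j → j + (m : Int) = p →
    (PySem.List.pyRange j p 1).foldl (pvAStep n p)
        (acc, j * q + max 0 (j - (p - r)))
      = (acc ++ (PySem.List.pyRange j p 1).map (pvBChunk q (p - r)),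
         p * q + r) := by
  intro m
  induction m with
  | zero =>
    intro j acc hj0 hjm
    have hjp : j = p := by omega
    rw [PySem.List.pyRange_one_eq_nil (by omega)]
    simp [hjp]
    omega
  | succ m ih =>
    intro j acc hj0 hjm
    have hjp : j < p := by omega
    rw [PySem.List.pyRange_one_cons hjp]
    simp only [List.foldl_cons, List.map_cons]
    have htot := pvStep_total n p q r j hq h0 hjp
    have hstep : pvAStep n p (acc, j * q + max 0 (j - (p - r))) j
        = (acc ++ [pvBChunk q (p - r) j],
           (j + 1) * q + max 0 (j + 1 - (p - r))) := by
      simp only [pvAStep, pvBChunk]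
      rw [htot]
    rw [hstep, ih (j + 1) (acc ++ [pvBChunk q (p - r) j]) (by omega) (by omega)]
    simp

-- ===== VERDICT (by name: the statement is the Claim_ definition above) =====
theorem allocate_all_jobs_spec : Claim_equal_allocate_all_jobs := by
  intro n p _
  unfold Spec_allocate_all_jobs allocate_all_jobs allocate_all_jobs_alt
  by_cases hp : p ≤ 0
  · rw [PySem.List.pyRange_one_eq_nil (by omega)]
    simp [hp]
  · simp only [hp, if_false]
    have hp' : 0 < p := by omega
    set q := PySem.Int.floordiv n p with hqdef
    set r := PySem.Int.mod n p with hrdef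
    have hqr : n = q * p + r := by
      rw [hqdef, hrdef]
      have := PySem.Int.floordiv_mul_add_mod n p
      omega
    have hre : r = n % p := by
      rw [hrdef, PySem.Int.mod_eq_emod_of_pos hp']
    have h0 : 0 ≤ r := by rw [hre]; exact Int.emod_nonneg n (by omega)
    have hrp : r < p := by rw [hre]; exact Int.emod_lt_of_pos n hp'
    have := pvLoop n p q r hqr h0 p.toNat 0 [] le_rfl (by omega)
    simp only [zero_mul, zero_add] at this
    have hmax : max 0 (0 - (p - r)) = 0 := by omega
    rw [hmax] at this
    rw [this]
    simp
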